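-- pv_equiv track=rewrite | github.com/wjdwnsdnjs13/algorithm | 프로그래머스/1/258712. 가장 많이 받은 선물/가장 많이 받은 선물.py | solution
-- ===== SOURCE A (Python) =====
-- def solution(friends, gifts):
-- #     friends 길이 <= 50
-- #     Uk 이고, 10글자 이하 소문자로 이루어짐
-- #     gifts 길이 <=10_000
-- #     "A B" 형태, "{선물_준_사람_이름} {선물_받은_사람_이름}"
--
--     giftLog = {f: {a: 0 for a in friends if(f != a)} for f in friends}
--
--     # gifts를 돌면서 A는 지수 +1, B는 지수 -1
--     giftIndicator = {f: 0 for f in friends}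
--
--     # 선물 지수 : (이번 달까지 자신이 준 선물) - (받은 선물)
--     for gift in gifts:
--         a, b = gift.split()
--         giftIndicator[a] += 1
--         giftIndicator[b] -= 1
--         giftLog[a][b] += 1
--
--     answer = {f : 0 for f in friends}
--     for col in giftLog:
--         for row in giftLog[col]:
--             # A : 서로 주고 받은 경우 이번 달에 더 많은 선물을 준 사람이 다음 달에 하나 더 받음.
--             if(giftLog[col][row] > giftLog[row][col]):
--                 answer[col] += 1
--             # B : 기록이 없거나, 서로 같은 양의 선물을 줬으면 '선물 지수'가 더 큰 사람이 선물 하나 받음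
--             elif(giftLog[col][row] == giftLog[row][col] and giftIndicator[col] > giftIndicator[row]):
--                 answer[col] += 1
--             # C : 선물 지수도 동일하면 선물 주고 받지 않음.
--             else:
--                 continue
--
--     return max(answer.values())
-- ===== SOURCE B (Python) =====
-- def solution(friends, gifts):
--     fs = list(dict.fromkeys(friends))
--     ind = {f: 0 for f in fs}
--     cnt = {}
--     for g in gifts:
--         a, b = g.split()
--         ind[a] += 1
--         ind[b] -= 1
--         cnt[(a, b)] = cnt.get((a, b), 0) + 1
--     # rank by gift index: a friend's base score is how many friends have a strictly
--     # smaller index (the indicator rule applied to every pair at once, via sorting)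
--     vals = sorted(ind[f] for f in fs)
--     first = {}
--     for i, v in enumerate(vals):
--         if v not in first:
--             first[v] = i
--     score = {f: first[ind[f]] for f in fs}
--     # correct only the pairs that actually exchanged unequal gift counts
--     for (a, b), c in cnt.items():
--         if c > cnt.get((b, a), 0):
--             score[a] += 1
--             if ind[a] > ind[b]:
--                 score[a] -= 1
--             elif ind[b] > ind[a]:
--                 score[b] -= 1
--     return max(score.values())
-- ===== Notes on version B (the rewrite author's own statement) =====
-- stated objective: alternative
-- what changed: Replaces A's ordered double loop comparing every pair of friends via the nested gift-log by a rank-by-sorting scheme: sort the gift indices once, give each friend a base score equal to the number of strictly smaller indices (the indicator rule applied to all pairs at once), then correct scores only for the pairs that actually exchanged unequal gift counts by a single pass over the (giver,receiver) counter's entries.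
import Mathlib
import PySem

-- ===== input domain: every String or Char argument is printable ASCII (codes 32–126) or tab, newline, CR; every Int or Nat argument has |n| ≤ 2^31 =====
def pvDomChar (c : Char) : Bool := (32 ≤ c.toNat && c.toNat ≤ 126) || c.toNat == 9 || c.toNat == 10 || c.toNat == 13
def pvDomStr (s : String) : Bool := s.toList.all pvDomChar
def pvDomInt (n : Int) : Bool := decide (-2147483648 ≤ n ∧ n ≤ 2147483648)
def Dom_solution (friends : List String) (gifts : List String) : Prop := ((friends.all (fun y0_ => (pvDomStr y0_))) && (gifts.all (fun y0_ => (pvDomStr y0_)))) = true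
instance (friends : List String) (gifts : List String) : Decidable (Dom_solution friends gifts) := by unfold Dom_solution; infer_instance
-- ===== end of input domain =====

set_option maxRecDepth 16384


-- B replaces A's ordered double loop over all friend pairs by sorting the gift indices
-- (base score = number of strictly smaller indices) plus a correction pass over only the
-- (giver,receiver) pairs that actually exchanged unequal gift counts.

-- ===== PORT A =====

-- one gift's update of the indicator dict: giftIndicator[a] += 1; giftIndicator[b] -= 1
def stepIndA (d : PySem.Dict String Int) (g : String) : PySem.Dict String Int :=
  match PySem.Str.split₀ g with
  | [a, b] => (d.modify a 0 (· + 1)).modify b 0 (· - 1)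
  | _ => d

-- one gift's update of the nested log dict: giftLog[a][b] += 1
def stepLogA (d : PySem.Dict String (PySem.Dict String Int)) (g : String) :
    PySem.Dict String (PySem.Dict String Int) :=
  match PySem.Str.split₀ g with
  | [a, b] => d.modify a PySem.Dict.empty (fun inner => inner.modify b 0 (· + 1))
  | _ => d

def solution (friends : List String) (gifts : List String) : Int :=
  let giftLog0 : PySem.Dict String (PySem.Dict String Int) :=
    friends.foldl (fun d f =>
      d.insert f (friends.foldl (fun inner a => if f ≠ a then inner.insert a 0 else inner)
        PySem.Dict.empty)) PySem.Dict.empty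
  let giftIndicator0 : PySem.Dict String Int :=
    friends.foldl (fun d f => d.insert f 0) PySem.Dict.empty
  let st := gifts.foldl (fun (st : PySem.Dict String Int × PySem.Dict String (PySem.Dict String Int)) g =>
      (stepIndA st.1 g, stepLogA st.2 g)) (giftIndicator0, giftLog0)
  let ind := st.1
  let log := st.2
  let answer0 : PySem.Dict String Int :=
    friends.foldl (fun d f => d.insert f 0) PySem.Dict.empty
  let answer := log.keys.foldl (fun ans col =>
      ((log.getD col PySem.Dict.empty).keys).foldl (fun ans row =>
        if (log.getD col PySem.Dict.empty).getD row 0 > (log.getD row PySem.Dict.empty).getD col 0 then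
          ans.modify col 0 (· + 1)
        else if (log.getD col PySem.Dict.empty).getD row 0 = (log.getD row PySem.Dict.empty).getD col 0
                ∧ ind.getD col 0 > ind.getD row 0 then
          ans.modify col 0 (· + 1)
        else ans) ans) answer0
  match PySem.List.max? answer.values (fun v => v) with
  | some m => m
  | none => 0

-- ===== PORT B =====

-- one gift's update of B's state: ind[a] += 1; ind[b] -= 1; cnt[(a,b)] = cnt.get((a,b),0)+1
def stepB (st : PySem.Dict String Int × PySem.Dict (String × String) Int) (g : String) :
    PySem.Dict String Int × PySem.Dict (String × String) Int :=
  match PySem.Str.split₀ g with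
  | [a, b] => ((st.1.modify a 0 (· + 1)).modify b 0 (· - 1),
               st.2.insert (a, b) (st.2.getD (a, b) 0 + 1))
  | _ => st

-- 'first = {}; for i, v in enumerate(vals): if v not in first: first[v] = i'
def firstIdx (vals : List Int) : PySem.Dict Int Int :=
  (PySem.List.enumerate vals).foldl
    (fun d iv => if d.contains iv.2 then d else d.insert iv.2 iv.1) PySem.Dict.empty

-- one step of the correction loop 'for (a, b), c in cnt.items(): …'
def corrStep (ind : PySem.Dict String Int) (cnt : PySem.Dict (String × String) Int)
    (score : PySem.Dict String Int) (kv : (String × String) × Int) : PySem.Dict String Int :=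
  if kv.2 > cnt.getD (kv.1.2, kv.1.1) 0 then
    let s1 := score.modify kv.1.1 0 (· + 1)
    if ind.getD kv.1.1 0 > ind.getD kv.1.2 0 then s1.modify kv.1.1 0 (· - 1)
    else if ind.getD kv.1.2 0 > ind.getD kv.1.1 0 then s1.modify kv.1.2 0 (· - 1)
    else s1
  else score

def solution_alt (friends : List String) (gifts : List String) : Int :=
  let fs := PySem.List.dedup friends
  let ind0 : PySem.Dict String Int := fs.foldl (fun d f => d.insert f 0) PySem.Dict.empty
  let st := gifts.foldl stepB (ind0, PySem.Dict.empty)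
  let ind := st.1
  let cnt := st.2
  let vals := PySem.List.sorted (fs.map (fun f => ind.getD f 0)) (fun v => v)
  let first := firstIdx vals
  let score0 : PySem.Dict String Int :=
    fs.foldl (fun d f => d.insert f (first.getD (ind.getD f 0) 0)) PySem.Dict.empty
  let score := cnt.items.foldl (corrStep ind cnt) score0
  match PySem.List.max? score.values (fun v => v) with
  | some m => m
  | none => 0

-- ===== PRECONDITION & SPEC =====
-- Pre_ excludes exactly the inputs where A raises: empty friends (ValueError from max),
-- and gifts that do not split into two distinct names both in friends (ValueError/KeyError).
def Pre_solution (friends : List String) (gifts : List String) : Prop :=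
  friends ≠ [] ∧
  ∀ g ∈ gifts, ∃ a ∈ friends, ∃ b ∈ friends, a ≠ b ∧ PySem.Str.split₀ g = [a, b]
instance (friends : List String) (gifts : List String) : Decidable (Pre_solution friends gifts) := by
  unfold Pre_solution; infer_instance
def pvWitness_solution : List String × List String := (["a", "b"], ["a b"])

def Spec_solution (friends : List String) (gifts : List String) (out : Int) : Prop := out = solution_alt friends gifts
instance (friends : List String) (gifts : List String) (out : Int) : Decidable (Spec_solution friends gifts out) := by unfold Spec_solution; infer_instance

-- ===== CLAIM (what is proved, stated in full; the proofs are below) =====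
def Claim_equal_solution : Prop := ∀ (friends : List String) (gifts : List String), Dom_solution friends gifts → Pre_solution friends gifts → Spec_solution friends gifts (solution friends gifts)

-- ===== LEMMAS AND PROOFS =====

-- number of gifts "x y" (x gave to y)
def cntv (gifts : List String) (x y : String) : Int :=
  ((gifts.countP (fun g => PySem.Str.split₀ g == [x, y])) : Int)

-- gift index of x: gifts given minus gifts received
def indv (gifts : List String) (x : String) : Int :=
  ((gifts.countP (fun g => match PySem.Str.split₀ g with
      | [a, _] => a == x
      | _ => false)) : Int)
  - ((gifts.countP (fun g => match PySem.Str.split₀ g with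
      | [_, b] => b == x
      | _ => false)) : Int)

-- x beats y (gets the extra gift for the pair {x,y})
def W (gifts : List String) (x y : String) : Bool :=
  decide (cntv gifts x y > cntv gifts y x ∨ (cntv gifts x y = cntv gifts y x ∧ indv gifts x > indv gifts y))

-- B's flat-counter update for one gift (the pair-counter component of stepB)
def pairStepB (d : PySem.Dict (String × String) Int) (g : String) : PySem.Dict (String × String) Int :=
  match PySem.Str.split₀ g with
  | [a, b] => d.insert (a, b) (d.getD (a, b) 0 + 1)
  | _ => d

-- the key list of A's inner dict for friend f
def rowsK (friends : List String) (f : String) : List String :=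
  PySem.List.dedup (friends.filter (fun a => decide ¬(f = a)))

-- a gift accepted by A: two distinct names, both in friends
def wfG (friends : List String) (g : String) : Prop :=
  ∃ a ∈ friends, ∃ b ∈ friends, a ≠ b ∧ PySem.Str.split₀ g = [a, b]

-- effect of one correction step on friend x's score
def eff (gifts : List String) (x : String) (k : String × String) : Int :=
  if cntv gifts k.1 k.2 > cntv gifts k.2 k.1 then
    (if x = k.1 then 1 else 0)
    - (if indv gifts k.1 > indv gifts k.2 then (if x = k.1 then (1:Int) else 0)
       else if indv gifts k.2 > indv gifts k.1 then (if x = k.2 then (1:Int) else 0)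
       else 0)
  else 0

lemma stepB_eq (st : PySem.Dict String Int × PySem.Dict (String × String) Int) (g : String) :
    stepB st g = (stepIndA st.1 g, pairStepB st.2 g) := by
  rcases st with ⟨i, p⟩
  rcases h : PySem.Str.split₀ g with _ | ⟨a, _ | ⟨b, _ | ⟨c, l⟩⟩⟩ <;>
    simp [stepB, pairStepB, stepIndA, h]

lemma foldB_eq (gifts : List String) (i : PySem.Dict String Int)
    (p : PySem.Dict (String × String) Int) :
    gifts.foldl stepB (i, p) = (gifts.foldl stepIndA i, gifts.foldl pairStepB p) := by
  calc gifts.foldl stepB (i, p)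
      = gifts.foldl (fun s e => (stepIndA s.1 e, pairStepB s.2 e)) (i, p) :=
        PySem.List.foldl_congr_mem _ _ _ _ (fun acc x _ => stepB_eq acc x)
    _ = _ := PySem.List.foldl_prod_mk _ _ _ _ _

lemma getD2_modify (d : PySem.Dict String (PySem.Dict String Int)) (a b x y : String) :
    ((d.modify a PySem.Dict.empty (fun i => i.modify b 0 (· + 1))).getD x PySem.Dict.empty).getD y 0
      = (d.getD x PySem.Dict.empty).getD y 0 + if x = a ∧ y = b then 1 else 0 := by
  rw [PySem.Dict.getD_modify]
  by_cases hx : x = a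
  · rw [if_pos hx, PySem.Dict.getD_modify]
    subst hx
    split_ifs <;> simp_all <;> omega
  · rw [if_neg hx]
    split_ifs <;> simp_all

lemma indA_getD (gs : List String) : ∀ (d : PySem.Dict String Int) (x : String),
    (gs.foldl stepIndA d).getD x 0 = d.getD x 0 + indv gs x := by
  induction gs with
  | nil => simp [indv]
  | cons g gs ih =>
    intro d x
    have hcons : indv (g :: gs) x = indv gs x
        + ((if (match PySem.Str.split₀ g with | [a, _] => a == x | _ => false) then (1:Int) else 0)
           - (if (match PySem.Str.split₀ g with | [_, b] => b == x | _ => false) then (1:Int) else 0)) := by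
      simp only [indv, List.countP_cons]
      split_ifs <;> push_cast <;> omega
    simp only [List.foldl_cons]
    rw [ih, hcons]
    rcases h : PySem.Str.split₀ g with _ | ⟨a, _ | ⟨b, _ | ⟨c, l⟩⟩⟩ <;>
      simp only [stepIndA, h]
    case cons.cons.cons.nil =>
      simp only [PySem.Dict.getD_modify]
      split_ifs <;> simp_all [beq_iff_eq] <;> omega
    all_goals simp <;> omega

lemma logA_getD (gs : List String) :
    ∀ (d : PySem.Dict String (PySem.Dict String Int)) (x y : String),
    ((gs.foldl stepLogA d).getD x PySem.Dict.empty).getD y 0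
      = (d.getD x PySem.Dict.empty).getD y 0 + cntv gs x y := by
  induction gs with
  | nil => simp [cntv]
  | cons g gs ih =>
    intro d x y
    have hcons : cntv (g :: gs) x y = cntv gs x y
        + (if PySem.Str.split₀ g = [x, y] then (1:Int) else 0) := by
      simp only [cntv, List.countP_cons, beq_iff_eq]
      split_ifs <;> push_cast <;> omega
    simp only [List.foldl_cons]
    rw [ih, hcons]
    rcases h : PySem.Str.split₀ g with _ | ⟨a, _ | ⟨b, _ | ⟨c, l⟩⟩⟩ <;>
      simp only [stepLogA, h]
    case cons.cons.cons.nil =>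
      rw [getD2_modify]
      have hiff : ([a, b] = [x, y]) ↔ (x = a ∧ y = b) := by
        simp only [List.cons.injEq, and_true]
        constructor
        · rintro ⟨h1, h2⟩; exact ⟨h1.symm, h2.symm⟩
        · rintro ⟨h1, h2⟩; exact ⟨h1.symm, h2.symm⟩
      split_ifs with h1 h2 <;> simp_all <;> omega
    all_goals simp <;> omega

lemma pairB_getD (gs : List String) : ∀ (d : PySem.Dict (String × String) Int) (x y : String),
    (gs.foldl pairStepB d).getD (x, y) 0 = d.getD (x, y) 0 + cntv gs x y := by
  induction gs with
  | nil => simp [cntv]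
  | cons g gs ih =>
    intro d x y
    have hcons : cntv (g :: gs) x y = cntv gs x y
        + (if PySem.Str.split₀ g = [x, y] then (1:Int) else 0) := by
      simp only [cntv, List.countP_cons, beq_iff_eq]
      split_ifs <;> push_cast <;> omega
    simp only [List.foldl_cons]
    rw [ih, hcons]
    rcases h : PySem.Str.split₀ g with _ | ⟨a, _ | ⟨b, _ | ⟨c, l⟩⟩⟩ <;>
      simp only [pairStepB, h]
    case cons.cons.cons.nil =>
      rw [PySem.Dict.getD_insert]
      have hiff : ((x, y) = (a, b)) ↔ ([a, b] = [x, y]) := by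
        simp only [Prod.mk.injEq, List.cons.injEq, and_true]
        constructor
        · rintro ⟨h1, h2⟩; exact ⟨h1.symm, h2.symm⟩
        · rintro ⟨h1, h2⟩; exact ⟨h1.symm, h2.symm⟩
      split_ifs with h1 h2 <;> simp_all <;> omega
    all_goals simp <;> omega

lemma init_getD (l : List String) : ∀ (d : PySem.Dict String Int) (x : String),
    (l.foldl (fun d f => d.insert f (0 : Int)) d).getD x 0 = if x ∈ l then 0 else d.getD x 0 := by
  induction l with
  | nil => simp
  | cons a l ih =>
    intro d x
    simp only [List.foldl_cons]
    rw [ih]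
    by_cases hx : x ∈ l
    · simp [hx]
    · simp only [hx, if_false, PySem.Dict.getD_insert, List.mem_cons, or_false]

lemma init0_getD (l : List String) (x : String) :
    (l.foldl (fun d f => d.insert f (0 : Int)) PySem.Dict.empty).getD x 0 = 0 := by
  rw [init_getD]
  split_ifs <;> simp [PySem.Dict.getD_empty]

lemma init0_keys (l : List String) :
    (l.foldl (fun d f => d.insert f (0 : Int)) PySem.Dict.empty).keys = PySem.List.dedup l := by
  rw [PySem.Dict.keys_foldl_insert l (fun _ _ => (0 : Int)) PySem.Dict.empty,
    PySem.Dict.keys_empty, PySem.Set.update_nil_left, PySem.List.dedup_eq_ofList]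

lemma condfold_eq_filter (f : String) (l : List String) : ∀ (i : PySem.Dict String Int),
    l.foldl (fun i a => if f ≠ a then i.insert a 0 else i) i
      = (l.filter (fun a => decide ¬(f = a))).foldl (fun i a => i.insert a (0 : Int)) i := by
  induction l with
  | nil => simp
  | cons a l ih =>
    intro i
    by_cases h : f = a
    · simpa [h] using ih i
    · simpa [h] using ih (i.insert a 0)

lemma build_get? {ν : Type} (F : String → ν) (l : List String) :
    ∀ (d : PySem.Dict String ν) (f : String),
    (l.foldl (fun d x => d.insert x (F x)) d).get? f = if f ∈ l then some (F f) else d.get? f := by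
  induction l with
  | nil => simp
  | cons a l ih =>
    intro d f
    simp only [List.foldl_cons]
    rw [ih]
    by_cases hf : f ∈ l
    · simp [hf]
    · simp [hf, PySem.Dict.get?_insert]
      split_ifs with h1 h2 <;> simp_all

lemma keys_modify_mem {ν : Type} (d : PySem.Dict String ν) (k : String) (d0 : ν) (f : ν → ν)
    (h : k ∈ d.keys) : (d.modify k d0 f).keys = d.keys := by
  rw [PySem.Dict.keys_modify]
  exact PySem.Dict.keys_insert_of_contains _ _ ((PySem.Dict.contains_iff_mem_keys _ _).2 h)

lemma logA_shape (friends : List String) (gs : List String) :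
    ∀ (d : PySem.Dict String (PySem.Dict String Int)),
    (∀ g ∈ gs, wfG friends g) →
    d.keys = PySem.List.dedup friends →
    (∀ f ∈ friends, (d.getD f PySem.Dict.empty).keys = rowsK friends f) →
    (gs.foldl stepLogA d).keys = PySem.List.dedup friends ∧
      ∀ f ∈ friends, ((gs.foldl stepLogA d).getD f PySem.Dict.empty).keys = rowsK friends f := by
  induction gs with
  | nil => exact fun d _ h1 h2 => ⟨h1, h2⟩
  | cons g gs ih =>
    intro d hwf hkeys hinner
    obtain ⟨a, ha, b, hb, hab, hsplit⟩ := hwf g (List.mem_cons_self ..)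
    have hstep : stepLogA d g = d.modify a PySem.Dict.empty (fun i => i.modify b 0 (· + 1)) := by
      simp [stepLogA, hsplit]
    have hka : a ∈ d.keys := by
      rw [hkeys, PySem.List.dedup_eq_ofList, PySem.Set.mem_ofList]; exact ha
    have hkeys' : (stepLogA d g).keys = PySem.List.dedup friends := by
      rw [hstep, keys_modify_mem _ _ _ _ hka, hkeys]
    have hinner' : ∀ f ∈ friends,
        ((stepLogA d g).getD f PySem.Dict.empty).keys = rowsK friends f := by
      intro f hf
      rw [hstep, PySem.Dict.getD_modify]
      by_cases hfa : f = a
      · rw [if_pos hfa]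
        subst hfa
        have hbmem : b ∈ (d.getD f PySem.Dict.empty).keys := by
          rw [hinner f hf, rowsK, PySem.List.dedup_eq_ofList, PySem.Set.mem_ofList,
            List.mem_filter]
          exact ⟨hb, by simpa using hab⟩
        rw [keys_modify_mem _ _ _ _ hbmem]
        exact hinner f hf
      · rw [if_neg hfa]
        exact hinner f hf
    simp only [List.foldl_cons]
    exact ih (stepLogA d g) (fun g' hg' => hwf g' (List.mem_cons_of_mem _ hg')) hkeys' hinner'

lemma foldA_inner_getD (Wc : String → Bool) (col : String) (rows : List String) :
    ∀ (ans : PySem.Dict String Int) (k : String),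
    (rows.foldl (fun ans row => if Wc row then ans.modify col 0 (· + 1) else ans) ans).getD k 0
      = ans.getD k 0 + if k = col then (rows.countP Wc : Int) else 0 := by
  induction rows with
  | nil => simp
  | cons r rs ih =>
    intro ans k
    simp only [List.foldl_cons]
    rw [ih]
    by_cases hw : Wc r = true <;>
      simp [hw, List.countP_cons, PySem.Dict.getD_modify] <;>
      split_ifs <;> simp_all <;> push_cast <;> omega

lemma foldA_outer_getD (gifts : List String) (rowsOf : String → List String) (cols : List String) :
    ∀ (ans : PySem.Dict String Int) (k : String), cols.Nodup →
    (cols.foldl (fun ans col =>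
        (rowsOf col).foldl (fun ans row => if W gifts col row then ans.modify col 0 (· + 1) else ans) ans)
      ans).getD k 0
      = ans.getD k 0 + if k ∈ cols then ((rowsOf k).countP (W gifts k) : Int) else 0 := by
  induction cols with
  | nil => simp
  | cons c cs ih =>
    intro ans k hnd
    obtain ⟨hc, hcs⟩ := List.nodup_cons.1 hnd
    simp only [List.foldl_cons]
    rw [ih _ _ hcs, foldA_inner_getD]
    by_cases hk : k = c
    · subst hk
      simp [hc]
    · simp [hk, List.mem_cons]

lemma foldA_inner_keys (Wc : String → Bool) (col : String) (rows : List String) :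
    ∀ (ans : PySem.Dict String Int), col ∈ ans.keys →
    (rows.foldl (fun ans row => if Wc row then ans.modify col 0 (· + 1) else ans) ans).keys
      = ans.keys := by
  induction rows with
  | nil => simp
  | cons r rs ih =>
    intro ans hcol
    simp only [List.foldl_cons]
    by_cases hw : Wc r = true
    · rw [show (if Wc r = true then ans.modify col 0 (· + 1) else ans) = ans.modify col 0 (· + 1) from if_pos hw]
      rw [ih _ (by rw [keys_modify_mem _ _ _ _ hcol]; exact hcol), keys_modify_mem _ _ _ _ hcol]
    · rw [show (if Wc r = true then ans.modify col 0 (· + 1) else ans) = ans from if_neg hw]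
      exact ih _ hcol

lemma foldA_outer_keys (gifts : List String) (rowsOf : String → List String) (cols : List String) :
    ∀ (ans : PySem.Dict String Int), (∀ c ∈ cols, c ∈ ans.keys) →
    (cols.foldl (fun ans col =>
        (rowsOf col).foldl (fun ans row => if W gifts col row then ans.modify col 0 (· + 1) else ans) ans)
      ans).keys = ans.keys := by
  induction cols with
  | nil => simp
  | cons c cs ih =>
    intro ans hmem
    simp only [List.foldl_cons]
    have h1 : ((rowsOf c).foldl
        (fun ans row => if W gifts c row = true then ans.modify c 0 (· + 1) else ans) ans).keys
        = ans.keys := foldA_inner_keys _ _ _ _ (hmem c (List.mem_cons_self ..))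
    rw [ih _ (fun x hx => by rw [h1]; exact hmem x (List.mem_cons_of_mem _ hx)), h1]

lemma rowsK_countP (friends : List String) (f : String) (p : String → Bool) :
    (rowsK friends f).countP p
      = ((PySem.List.dedup friends).filter (fun g => decide ¬(g = f))).countP p := by
  have hperm : (rowsK friends f).Perm
      ((PySem.List.dedup friends).filter (fun g => decide ¬(g = f))) := by
    rw [List.perm_ext_iff_of_nodup]
    · intro a
      rw [rowsK, PySem.List.dedup_eq_ofList, PySem.Set.mem_ofList, List.mem_filter,
        List.mem_filter, PySem.List.dedup_eq_ofList, PySem.Set.mem_ofList]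
      simp only [decide_eq_true_eq]
      constructor
      · rintro ⟨h1, h2⟩; exact ⟨h1, fun h => h2 h.symm⟩
      · rintro ⟨h1, h2⟩; exact ⟨h1, fun h => h2 h.symm⟩
    · rw [rowsK, PySem.List.dedup_eq_ofList]; exact PySem.Set.nodup_ofList _
    · exact List.Nodup.filter _ (by rw [PySem.List.dedup_eq_ofList]; exact PySem.Set.nodup_ofList _)
  exact hperm.countP_eq _

-- ---- B-side lemmas ----

-- membership in the pair-counter's key list
lemma pairB_mem_keys (gs : List String) : ∀ (d : PySem.Dict (String × String) Int) (k : String × String),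
    k ∈ (gs.foldl pairStepB d).keys ↔ k ∈ d.keys ∨ ∃ g ∈ gs, PySem.Str.split₀ g = [k.1, k.2] := by
  induction gs with
  | nil => simp
  | cons g gs ih =>
    intro d k
    have hstep : ∀ (d : PySem.Dict (String × String) Int) (k : String × String),
        k ∈ (pairStepB d g).keys ↔ PySem.Str.split₀ g = [k.1, k.2] ∨ k ∈ d.keys := by
      intro d k
      rcases h : PySem.Str.split₀ g with _ | ⟨a, _ | ⟨b, _ | ⟨c, l⟩⟩⟩ <;>
        simp only [pairStepB, h]
      case cons.cons.nil =>
        rw [PySem.Dict.mem_keys_insert]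
        constructor
        · rintro (rfl | hk)
          · exact Or.inl rfl
          · exact Or.inr hk
        · rintro (hs | hk)
          · injection hs with h1 h2
            injection h2 with h2 _
            exact Or.inl (Prod.ext h1.symm h2.symm)
          · exact Or.inr hk
      all_goals simp
    simp only [List.foldl_cons]
    rw [ih, hstep]
    constructor
    · rintro ((hg | hk) | ⟨g', hg', hs⟩)
      · exact Or.inr ⟨g, List.mem_cons_self .., hg⟩
      · exact Or.inl hk
      · exact Or.inr ⟨g', List.mem_cons_of_mem _ hg', hs⟩
    · rintro (hk | ⟨g', hg', hs⟩)
      · exact Or.inl (Or.inr hk)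
      · rcases List.mem_cons.1 hg' with rfl | hm
        · exact Or.inl (Or.inl hs)
        · exact Or.inr ⟨g', hm, hs⟩

lemma pairB_nodup_keys (gs : List String) : ∀ (d : PySem.Dict (String × String) Int),
    d.keys.Nodup → (gs.foldl pairStepB d).keys.Nodup := by
  induction gs with
  | nil => exact fun d h => h
  | cons g gs ih =>
    intro d hnd
    simp only [List.foldl_cons]
    apply ih
    rcases h : PySem.Str.split₀ g with _ | ⟨a, _ | ⟨b, _ | ⟨c, l⟩⟩⟩ <;>
      simp only [pairStepB, h] <;>
      first
        | exact hnd
        | exact PySem.Dict.nodup_keys_insert _ _ _ hnd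

-- cntv positive iff some gift splits as [x, y]
lemma cntv_pos_iff (gs : List String) (x y : String) :
    0 < cntv gs x y ↔ ∃ g ∈ gs, PySem.Str.split₀ g = [x, y] := by
  unfold cntv
  rw [show ((0:Int) < ((gs.countP (fun g => PySem.Str.split₀ g == [x, y])) : Int))
      ↔ 0 < gs.countP (fun g => PySem.Str.split₀ g == [x, y]) by exact_mod_cast Iff.rfl]
  rw [List.countP_pos_iff]
  simp [beq_iff_eq]

-- the firstIdx dict looks up the first occurrence index
lemma firstIdx_aux (l : List Int) : ∀ (s : Int) (d : PySem.Dict Int Int) (v : Int),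
    ((PySem.List.enumerate l s).foldl
        (fun d iv => if d.contains iv.2 then d else d.insert iv.2 iv.1) d).getD v 0
      = if d.contains v then d.getD v 0
        else if v ∈ l then s + (l.idxOf v : Int) else d.getD v 0 := by
  induction l with
  | nil => intro s d v; simp [PySem.List.enumerate]
  | cons x xs ih =>
    intro s d v
    rw [PySem.List.enumerate_cons]
    simp only [List.foldl_cons]
    by_cases hcx : d.contains x = true
    · rw [if_pos hcx, ih]
      by_cases hcv : d.contains v = true
      · rw [if_pos hcv, if_pos hcv]
      · rw [if_neg hcv, if_neg hcv]
        have hvx : v ≠ x := fun h => hcv (h ▸ hcx)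
        by_cases hm : v ∈ xs
        · rw [if_pos hm, if_pos (List.mem_cons_of_mem _ hm), List.idxOf_cons]
          have : (x == v) = false := beq_eq_false_iff_ne.2 (Ne.symm hvx)
          rw [this]
          simp only [cond_false]
          push_cast
          ring
        · have : v ∉ x :: xs := by
            intro hc
            rcases List.mem_cons.1 hc with h | h
            · exact hvx h
            · exact hm h
          rw [if_neg hm, if_neg this]
    · rw [if_neg hcx, ih]
      by_cases hvx : v = x
      · subst hvx
        have hc' : (d.insert v s).contains v = true := PySem.Dict.contains_insert_self _ _ _
        rw [if_pos hc', if_neg hcx, if_pos (List.mem_cons_self ..)]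
        rw [PySem.Dict.getD_insert, if_pos rfl, List.idxOf_cons_self]
        simp
      · have hc' : (d.insert x s).contains v = d.contains v := by
          rw [PySem.Dict.contains_insert]
          simp [hvx]
        rw [hc', PySem.Dict.getD_insert, if_neg hvx]
        by_cases hcv : d.contains v = true
        · rw [if_pos hcv, if_pos hcv]
        · rw [if_neg hcv, if_neg hcv]
          by_cases hm : v ∈ xs
          · rw [if_pos hm, if_pos (List.mem_cons_of_mem _ hm), List.idxOf_cons]
            have : (x == v) = false := beq_eq_false_iff_ne.2 (Ne.symm hvx)
            rw [this]
            simp only [cond_false]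
            push_cast
            ring
          · have : v ∉ x :: xs := by
              intro hc
              rcases List.mem_cons.1 hc with h | h
              · exact hvx h
              · exact hm h
            rw [if_neg hm, if_neg this]

-- in a ≤-sorted list the first occurrence index counts the strictly smaller elements
lemma idxOf_sorted_eq_countP (l : List Int) (v : Int) (hs : l.Pairwise (· ≤ ·)) (hv : v ∈ l) :
    (l.idxOf v : Int) = (l.countP (fun w => decide (w < v)) : Int) := by
  induction l with
  | nil => cases hv
  | cons x xs ih =>
    obtain ⟨hx, hxs⟩ := List.pairwise_cons.1 hs
    by_cases hvx : v = x
    · subst hvx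
      rw [List.idxOf_cons_self]
      have h0 : xs.countP (fun w => decide (w < v)) = 0 := by
        rw [List.countP_eq_zero]
        intro w hw
        have := hx w hw
        simp only [decide_eq_true_eq]
        omega
      simp [List.countP_cons, h0]
    · have hm : v ∈ xs := by
        rcases List.mem_cons.1 hv with h | h
        · exact absurd h hvx
        · exact h
      have hxv : x < v := lt_of_le_of_ne (hx v hm) (fun h => hvx h.symm)
      have hb : (x == v) = false := beq_eq_false_iff_ne.2 (Ne.symm hvx)
      have hc : (x :: xs).countP (fun w => decide (w < v))
          = xs.countP (fun w => decide (w < v)) + 1 := by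
        simp [List.countP_cons, hxv]
      rw [List.idxOf_cons, hb, hc]
      simp only [cond_false]
      push_cast
      rw [ih hxs hm]

lemma firstIdx_getD (l : List Int) (v : Int) (hs : l.Pairwise (· ≤ ·)) (hv : v ∈ l) :
    (firstIdx l).getD v 0 = (l.countP (fun w => decide (w < v)) : Int) := by
  unfold firstIdx
  rw [firstIdx_aux, if_neg (by rw [PySem.Dict.contains_empty]; simp), if_pos hv,
    idxOf_sorted_eq_countP l v hs hv]
  ring

lemma corrStep_getD (gifts : List String) (indD : PySem.Dict String Int)
    (cntD : PySem.Dict (String × String) Int)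
    (hind : ∀ x, indD.getD x 0 = indv gifts x)
    (hcnt : ∀ x y, cntD.getD (x, y) 0 = cntv gifts x y)
    (s : PySem.Dict String Int) (kv : (String × String) × Int) (x : String)
    (hv : kv.2 = cntv gifts kv.1.1 kv.1.2) :
    (corrStep indD cntD s kv).getD x 0 = s.getD x 0 + eff gifts x kv.1 := by
  unfold corrStep eff
  rw [hv, hcnt, hind, hind]
  split_ifs
  all_goals try simp only [PySem.Dict.getD_modify]
  all_goals try split_ifs
  all_goals try simp_all
  all_goals omega

-- the correction fold adds, per friend, the sum of the per-entry effects
lemma corr_fold_getD (gifts : List String) (indD : PySem.Dict String Int)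
    (cntD : PySem.Dict (String × String) Int)
    (hind : ∀ x, indD.getD x 0 = indv gifts x)
    (hcnt : ∀ x y, cntD.getD (x, y) 0 = cntv gifts x y) :
    ∀ (L : List ((String × String) × Int)) (s : PySem.Dict String Int) (x : String),
    (∀ kv ∈ L, kv.2 = cntv gifts kv.1.1 kv.1.2) →
    (L.foldl (corrStep indD cntD) s).getD x 0 = s.getD x 0 + (L.map (fun kv => eff gifts x kv.1)).sum := by
  intro L
  induction L with
  | nil => simp
  | cons kv L ih =>
    intro s x hvals
    simp only [List.foldl_cons, List.map_cons, List.sum_cons]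
    rw [ih _ _ (fun kv' h => hvals kv' (List.mem_cons_of_mem _ h)),
      corrStep_getD gifts indD cntD hind hcnt s kv x (hvals kv (List.mem_cons_self ..))]
    ring

lemma corr_fold_keys (indD : PySem.Dict String Int) (cntD : PySem.Dict (String × String) Int) :
    ∀ (L : List ((String × String) × Int)) (s : PySem.Dict String Int),
    (∀ kv ∈ L, kv.1.1 ∈ s.keys ∧ kv.1.2 ∈ s.keys) →
    (L.foldl (corrStep indD cntD) s).keys = s.keys := by
  intro L
  induction L with
  | nil => exact fun s _ => rfl
  | cons kv L ih =>
    intro s hmem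
    obtain ⟨h1, h2⟩ := hmem kv (List.mem_cons_self ..)
    have hstep : (corrStep indD cntD s kv).keys = s.keys := by
      unfold corrStep
      split_ifs
      · rw [keys_modify_mem _ _ _ _ (by rw [keys_modify_mem _ _ _ _ h1]; exact h1),
          keys_modify_mem _ _ _ _ h1]
      · rw [keys_modify_mem _ _ _ _ (by rw [keys_modify_mem _ _ _ _ h1]; exact h2),
          keys_modify_mem _ _ _ _ h1]
      · exact keys_modify_mem _ _ _ _ h1
      · rfl
    simp only [List.foldl_cons]
    rw [ih _ (fun kv' h => by rw [hstep]; exact hmem kv' (List.mem_cons_of_mem _ h)), hstep]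

-- dropping the zero summands of an Int sum
lemma sum_map_filter_ne_zero {κ : Type} [DecidableEq κ] (f : κ → Int) (L : List κ) :
    (L.map f).sum = ((L.filter (fun k => decide (f k ≠ 0))).map f).sum := by
  induction L with
  | nil => simp
  | cons a L ih =>
    by_cases h : f a = 0 <;>
      simp [List.filter_cons, h, ih]

-- sums over two Nodup lists agree when every nonzero summand is in both or neither
lemma sum_eq_of_nodup {κ : Type} [DecidableEq κ] (f : κ → Int) (L M : List κ)
    (hL : L.Nodup) (hM : M.Nodup) (h : ∀ k, f k ≠ 0 → (k ∈ L ↔ k ∈ M)) :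
    (L.map f).sum = (M.map f).sum := by
  rw [sum_map_filter_ne_zero f L, sum_map_filter_ne_zero f M]
  have hperm : (L.filter (fun k => decide (f k ≠ 0))).Perm (M.filter (fun k => decide (f k ≠ 0))) := by
    rw [List.perm_ext_iff_of_nodup (hL.filter _) (hM.filter _)]
    intro k
    simp only [List.mem_filter, decide_eq_true_eq]
    constructor
    · rintro ⟨hk, hne⟩
      exact ⟨(h k hne).mp hk, hne⟩
    · rintro ⟨hk, hne⟩
      exact ⟨(h k hne).mpr hk, hne⟩
  exact (hperm.map f).sum_eq

-- the two ordered keys for each partner y of x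
def pairsOf (x : String) (ys : List String) : List (String × String) :=
  ys.flatMap (fun y => [(x, y), (y, x)])

lemma mem_pairsOf (x : String) (ys : List String) (k : String × String) :
    k ∈ pairsOf x ys ↔ ∃ y ∈ ys, k = (x, y) ∨ k = (y, x) := by
  simp only [pairsOf, List.mem_flatMap, List.mem_cons, List.mem_singleton]
  constructor
  · rintro ⟨y, hy, rfl | rfl | hf⟩
    · exact ⟨y, hy, Or.inl rfl⟩
    · exact ⟨y, hy, Or.inr rfl⟩
    · cases hf
  · rintro ⟨y, hy, rfl | rfl⟩
    · exact ⟨y, hy, Or.inl rfl⟩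
    · exact ⟨y, hy, Or.inr (Or.inl rfl)⟩

lemma nodup_pairsOf (x : String) (ys : List String) (hnd : ys.Nodup) (hx : x ∉ ys) :
    (pairsOf x ys).Nodup := by
  induction ys with
  | nil => simp [pairsOf]
  | cons y ys ih =>
    obtain ⟨hy, hys⟩ := List.nodup_cons.1 hnd
    have hxy : x ≠ y := fun h => hx (h ▸ List.mem_cons_self ..)
    have hxys : x ∉ ys := fun h => hx (List.mem_cons_of_mem _ h)
    have hrest := ih hys hxys
    have hcons : pairsOf x (y :: ys) = (x, y) :: (y, x) :: pairsOf x ys := by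
      simp [pairsOf]
    rw [hcons]
    refine List.nodup_cons.2 ⟨?_, List.nodup_cons.2 ⟨?_, hrest⟩⟩
    · intro hmem
      rcases List.mem_cons.1 hmem with heq | hmem'
      · injection heq with e1 e2
        exact hxy e1
      · rcases (mem_pairsOf x ys _).1 hmem' with ⟨y', hy', heq | heq⟩
        · injection heq with e1 e2
          exact hy (e2 ▸ hy')
        · injection heq with e1 e2
          exact hxys (e1 ▸ hy')
    · intro hmem
      rcases (mem_pairsOf x ys _).1 hmem with ⟨y', hy', heq | heq⟩
      · injection heq with e1 e2
        exact hxy (e1.symm)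
      · injection heq with e1 e2
        exact hy (e1 ▸ hy')

lemma sum_pairsOf (gifts : List String) (x : String) (ys : List String) :
    ((pairsOf x ys).map (eff gifts x)).sum
      = (ys.map (fun y => eff gifts x (x, y) + eff gifts x (y, x))).sum := by
  induction ys with
  | nil => simp [pairsOf]
  | cons y ys ih =>
    have hcons : pairsOf x (y :: ys) = (x, y) :: (y, x) :: pairsOf x ys := by
      simp [pairsOf]
    rw [hcons]
    simp only [List.map_cons, List.sum_cons]
    rw [ih]
    ring

-- per-pair identity: the win indicator is the indicator base plus the two effects
lemma win_eq_base_add_eff (gifts : List String) (x y : String) (hxy : x ≠ y) :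
    (if W gifts x y then (1:Int) else 0)
      = (if indv gifts y < indv gifts x then (1:Int) else 0)
        + eff gifts x (x, y) + eff gifts x (y, x) := by
  have hc1 : (0:Int) ≤ cntv gifts x y := by unfold cntv; exact Int.natCast_nonneg _
  have hc2 : (0:Int) ≤ cntv gifts y x := by unfold cntv; exact Int.natCast_nonneg _
  simp only [W, eff, decide_eq_true_eq]
  split_ifs <;> simp_all <;> omega

lemma cntv_nonneg (gifts : List String) (x y : String) : (0:Int) ≤ cntv gifts x y := by
  unfold cntv; exact Int.natCast_nonneg _

lemma eff_ne_zero (gifts : List String) (x : String) (k : String × String)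
    (h : eff gifts x k ≠ 0) :
    cntv gifts k.2 k.1 < cntv gifts k.1 k.2 ∧ (x = k.1 ∨ x = k.2) := by
  by_cases h1 : cntv gifts k.1 k.2 > cntv gifts k.2 k.1
  · refine ⟨h1, ?_⟩
    by_cases hx1 : x = k.1
    · exact Or.inl hx1
    · by_cases hx2 : x = k.2
      · exact Or.inr hx2
      · exfalso
        apply h
        unfold eff
        rw [if_pos h1, if_neg hx1]
        split_ifs <;> simp [hx1, hx2]
  · exfalso
    apply h
    unfold eff
    exact if_neg h1

lemma sum_map_ite_prop {α : Type} (l : List α) (p : α → Prop) [DecidablePred p] :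
    (l.map (fun y => if p y then (1:Int) else 0)).sum = (l.countP (fun y => decide (p y)) : Int) := by
  induction l with
  | nil => simp
  | cons a l ih =>
    simp only [List.map_cons, List.sum_cons, List.countP_cons, ih]
    by_cases h : p a <;> simp [h] <;> push_cast <;> ring

-- ===== VERDICT (by name: the statement is the Claim_ definition above) =====
theorem solution_spec : Claim_equal_solution := by
  intro friends gifts _ hpre
  obtain ⟨hne, hgifts⟩ := hpre
  have hwf : ∀ g ∈ gifts, wfG friends g := hgifts
  unfold Spec_solution
  simp only [solution, solution_alt, PySem.List.foldl_prod_mk, foldB_eq]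
  set ded := PySem.List.dedup friends with hded
  set bld := List.foldl (fun d f =>
      d.insert f (List.foldl (fun inner a => if f ≠ a then inner.insert a (0 : Int) else inner)
        PySem.Dict.empty friends)) PySem.Dict.empty friends with hbld
  set logF := List.foldl stepLogA bld gifts with hlogF
  set indF := List.foldl stepIndA
      (List.foldl (fun d f => d.insert f (0 : Int)) PySem.Dict.empty friends) gifts with hindF
  set ans0 := List.foldl (fun d f => d.insert f (0 : Int)) PySem.Dict.empty friends with hans0
  set cntF := List.foldl pairStepB PySem.Dict.empty gifts with hcntF
  set indB := List.foldl stepIndA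
      (List.foldl (fun d f => d.insert f (0 : Int)) PySem.Dict.empty ded) gifts with hindB
  set valsB := PySem.List.sorted (List.map (fun f => indB.getD f 0) ded) (fun v => v) with hvalsB
  set sc0 := List.foldl (fun d f => d.insert f ((firstIdx valsB).getD (indB.getD f 0) 0))
      PySem.Dict.empty ded with hsc0
  set scF := List.foldl (corrStep indB cntF) sc0 cntF.items with hscF
  have hdednd : ded.Nodup := by
    rw [hded, PySem.List.dedup_eq_ofList]; exact PySem.Set.nodup_ofList _
  have hmemded : ∀ x, x ∈ ded ↔ x ∈ friends := by
    intro x; rw [hded, PySem.List.dedup_eq_ofList, PySem.Set.mem_ofList]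
  have hindA : ∀ x, indF.getD x 0 = indv gifts x := by
    intro x; rw [hindF, indA_getD, init0_getD, zero_add]
  have hiB : ∀ x, indB.getD x 0 = indv gifts x := by
    intro x; rw [hindB, indA_getD, init0_getD, zero_add]
  have hcnt : ∀ x y, cntF.getD (x, y) 0 = cntv gifts x y := by
    intro x y; rw [hcntF, pairB_getD, PySem.Dict.getD_empty, zero_add]
  -- A-side canonicalisation
  have hlog0 : ∀ x y, (bld.getD x PySem.Dict.empty).getD y 0 = 0 := by
    intro x y
    rw [PySem.Dict.getD_eq_get?_getD bld x PySem.Dict.empty, hbld, build_get?]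
    by_cases hx : x ∈ friends
    · rw [if_pos hx]
      simp only [Option.getD_some]
      rw [condfold_eq_filter, init0_getD]
    · rw [if_neg hx]
      simp [PySem.Dict.get?_empty, PySem.Dict.getD_empty, Option.getD_none]
  have hcntA : ∀ x y, (logF.getD x PySem.Dict.empty).getD y 0 = cntv gifts x y := by
    intro x y; rw [hlogF, logA_getD, hlog0, zero_add]
  have hbkeys : bld.keys = ded := by
    rw [hbld, PySem.Dict.keys_foldl_insert, PySem.Dict.keys_empty, PySem.Set.update_nil_left,
      hded, PySem.List.dedup_eq_ofList]
  have hbinner : ∀ f ∈ friends, (bld.getD f PySem.Dict.empty).keys = rowsK friends f := by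
    intro f hf
    rw [PySem.Dict.getD_eq_get?_getD bld f PySem.Dict.empty, hbld, build_get?, if_pos hf]
    simp only [Option.getD_some]
    rw [condfold_eq_filter, init0_keys, rowsK]
  have hshape := logA_shape friends gifts bld hwf hbkeys hbinner
  rw [← hlogF] at hshape
  have hAcanon : List.foldl (fun ans col =>
      List.foldl (fun ans row =>
        if (logF.getD col PySem.Dict.empty).getD row 0 > (logF.getD row PySem.Dict.empty).getD col 0 then
          ans.modify col 0 fun x => x + 1
        else
          if (logF.getD col PySem.Dict.empty).getD row 0 = (logF.getD row PySem.Dict.empty).getD col 0 ∧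
              indF.getD col 0 > indF.getD row 0 then
            ans.modify col 0 fun x => x + 1
          else ans)
        ans (logF.getD col PySem.Dict.empty).keys) ans0 logF.keys
      = List.foldl (fun ans col =>
          List.foldl (fun ans row =>
            if W gifts col row = true then ans.modify col 0 (· + 1) else ans) ans (rowsK friends col))
          ans0 ded := by
    rw [hshape.1]
    apply PySem.List.foldl_congr_mem
    intro acc col hcol
    rw [hshape.2 col ((hmemded col).1 hcol)]
    apply PySem.List.foldl_congr_mem
    intro acc2 row _
    rw [hcntA col row, hcntA row col, hindA col, hindA row]
    simp only [W, decide_eq_true_eq]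
    split_ifs <;> first | rfl | tauto
  rw [hAcanon]
  set ansF := List.foldl (fun ans col =>
      List.foldl (fun ans row =>
        if W gifts col row = true then ans.modify col 0 (· + 1) else ans) ans (rowsK friends col))
      ans0 ded with hansF
  -- B-side facts
  have hknd : cntF.keys.Nodup := by
    rw [hcntF]
    exact pairB_nodup_keys gifts PySem.Dict.empty
      (by rw [PySem.Dict.keys_empty]; exact List.nodup_nil)
  have hkmem : ∀ k : String × String, k ∈ cntF.keys ↔ 0 < cntv gifts k.1 k.2 := by
    intro k
    rw [hcntF, pairB_mem_keys, cntv_pos_iff]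
    simp [PySem.Dict.keys_empty]
  have hkcomp : ∀ k : String × String, k ∈ cntF.keys →
      k.1 ∈ friends ∧ k.2 ∈ friends ∧ k.1 ≠ k.2 := by
    intro k hk
    obtain ⟨g, hg, hs⟩ := (cntv_pos_iff gifts k.1 k.2).1 ((hkmem k).1 hk)
    obtain ⟨a, ha, b, hb, hab, hsplit⟩ := hwf g hg
    rw [hsplit] at hs
    injection hs with e1 e2
    injection e2 with e2 _
    exact ⟨e1 ▸ ha, e2 ▸ hb, by rw [← e1, ← e2]; exact hab⟩
  have hitems : cntF.items = cntF.keys.map (fun k => (k, cntF.getD k 0)) :=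
    PySem.Dict.items_eq_map_keys cntF hknd 0
  have hivals : ∀ kv ∈ cntF.items, kv.2 = cntv gifts kv.1.1 kv.1.2 := by
    intro kv hkv
    rw [hitems] at hkv
    obtain ⟨k, hk, rfl⟩ := List.mem_map.1 hkv
    simpa using hcnt k.1 k.2
  have hsc0keys : sc0.keys = ded := by
    rw [hsc0, PySem.Dict.keys_foldl_insert, PySem.Dict.keys_empty, PySem.Set.update_nil_left,
      ← PySem.List.dedup_eq_ofList]
    rw [hded, PySem.List.dedup_eq_ofList, PySem.List.dedup_eq_ofList]
    exact PySem.Set.ofList_eq_self_of_nodup _ (by rw [← PySem.List.dedup_eq_ofList, ← hded]; exact hdednd)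
  have hsc0getD : ∀ f ∈ ded, sc0.getD f 0
      = (ded.countP (fun y => decide (indv gifts y < indv gifts f)) : Int) := by
    intro f hf
    rw [hsc0, PySem.Dict.getD_eq_get?_getD,
      build_get? (fun f => (firstIdx valsB).getD (indB.getD f 0) 0) ded PySem.Dict.empty f,
      if_pos hf]
    simp only [Option.getD_some]
    rw [hiB f]
    have hvals_eq : valsB = PySem.List.sorted (ded.map (indv gifts)) (fun v => v) := by
      rw [hvalsB]
      congr 1
      exact List.map_congr_left (fun x _ => hiB x)
    have hsortp : valsB.Pairwise (· ≤ ·) := by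
      rw [hvals_eq]; exact PySem.List.sorted_pairwise _ _
    have hvm : indv gifts f ∈ valsB := by
      rw [hvals_eq, PySem.List.mem_sorted]
      exact List.mem_map.2 ⟨f, hf, rfl⟩
    rw [firstIdx_getD valsB (indv gifts f) hsortp hvm]
    congr 1
    rw [hvals_eq, (PySem.List.sorted_perm _ _ _).countP_eq, List.countP_map]
    rfl
  have hscFgetD : ∀ x, scF.getD x 0 = sc0.getD x 0 + ((cntF.keys).map (eff gifts x)).sum := by
    intro x
    rw [hscF, corr_fold_getD gifts indB cntF hiB hcnt cntF.items sc0 x hivals, hitems,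
      List.map_map]
    rfl
  have hitemmem : ∀ kv ∈ cntF.items, kv.1.1 ∈ sc0.keys ∧ kv.1.2 ∈ sc0.keys := by
    intro kv hkv
    have hk : kv.1 ∈ cntF.keys := by
      rw [hitems] at hkv
      obtain ⟨k, hk, rfl⟩ := List.mem_map.1 hkv
      exact hk
    obtain ⟨h1, h2, _⟩ := hkcomp _ hk
    rw [hsc0keys]
    exact ⟨(hmemded _).2 h1, (hmemded _).2 h2⟩
  have hscFkeys : scF.keys = ded := by
    rw [hscF, corr_fold_keys indB cntF cntF.items sc0 hitemmem, hsc0keys]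
  -- converting the key sum into a per-partner sum
  have hsum : ∀ f ∈ ded, ((cntF.keys).map (eff gifts f)).sum
      = ((ded.filter (fun g => decide ¬(g = f))).map
          (fun y => eff gifts f (f, y) + eff gifts f (y, f))).sum := by
    intro f hf
    have hothnd : (ded.filter (fun g => decide ¬(g = f))).Nodup := hdednd.filter _
    have hfno : f ∉ ded.filter (fun g => decide ¬(g = f)) := by
      intro hc
      have := (List.mem_filter.1 hc).2
      simp at this
    have hsum1 : ((cntF.keys).map (eff gifts f)).sum
        = ((pairsOf f (ded.filter (fun g => decide ¬(g = f)))).map (eff gifts f)).sum := by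
      apply sum_eq_of_nodup _ _ _ hknd (nodup_pairsOf f _ hothnd hfno)
      intro k hne
      obtain ⟨hlt, hx⟩ := eff_ne_zero gifts f k hne
      have hpos : 0 < cntv gifts k.1 k.2 := lt_of_le_of_lt (cntv_nonneg gifts k.2 k.1) hlt
      have hkk : k ∈ cntF.keys := (hkmem k).2 hpos
      obtain ⟨h1, h2, h12⟩ := hkcomp k hkk
      constructor
      · intro _
        apply (mem_pairsOf f _ k).2
        rcases hx with h | h
        · refine ⟨k.2, ?_, Or.inl ?_⟩
          · rw [List.mem_filter]
            refine ⟨(hmemded _).2 h2, ?_⟩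
            simp only [decide_eq_true_eq]
            intro e
            exact h12 ((e.trans h).symm)
          · exact Prod.ext h.symm rfl
        · refine ⟨k.1, ?_, Or.inr ?_⟩
          · rw [List.mem_filter]
            refine ⟨(hmemded _).2 h1, ?_⟩
            simp only [decide_eq_true_eq]
            intro e
            exact h12 (e.trans h)
          · exact Prod.ext rfl h.symm
      · intro _
        exact hkk
    rw [hsum1, sum_pairsOf]
  -- the per-friend value identity
  have hpoint : ∀ f ∈ ded,
      (((rowsK friends f).countP (W gifts f) : Int))
        = sc0.getD f 0 + ((cntF.keys).map (eff gifts f)).sum := by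
    intro f hf
    have h1 : (rowsK friends f).countP (W gifts f)
        = ((ded.filter (fun g => decide ¬(g = f))).countP (W gifts f)) := by
      rw [rowsK_countP friends f, ← hded]
    have h01 : (((ded.filter (fun g => decide ¬(g = f))).countP (W gifts f)) : Int)
        = ((ded.filter (fun g => decide ¬(g = f))).map
            (fun y => if W gifts f y then (1:Int) else 0)).sum :=
      (PySem.List.sum_map_ite_one_zero _ _).symm
    have hcong : (ded.filter (fun g => decide ¬(g = f))).map
          (fun y => if W gifts f y then (1:Int) else 0)
        = (ded.filter (fun g => decide ¬(g = f))).map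
            (fun y => (if indv gifts y < indv gifts f then (1:Int) else 0)
              + (eff gifts f (f, y) + eff gifts f (y, f))) := by
      apply List.map_congr_left
      intro y hy
      have hyne : f ≠ y := by
        have := (List.mem_filter.1 hy).2
        simp only [decide_eq_true_eq] at this
        exact fun e => this e.symm
      rw [win_eq_base_add_eff gifts f y hyne]
      ring
    have hbase : (ded.filter (fun g => decide ¬(g = f))).countP
          (fun y => decide (indv gifts y < indv gifts f))
        = ded.countP (fun y => decide (indv gifts y < indv gifts f)) := by
      rw [List.countP_filter]
      apply List.countP_congr
      intro y hy
      by_cases hyf : y = f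
      · subst hyf
        simp
      · simp [hyf]
    rw [h1, h01, hcong, PySem.List.sum_map_add_int, sum_map_ite_prop, hbase,
      hsc0getD f hf, hsum f hf]
  -- per-friend A value
  have hans0keys : ans0.keys = ded := by
    rw [hans0, init0_keys, ← hded]
  have hAkeys : ansF.keys = ded := by
    rw [hansF, foldA_outer_keys gifts (rowsK friends) ded ans0
      (fun c hc => by rw [hans0keys]; exact hc), hans0keys]
  have hAget : ∀ f ∈ ded, ansF.getD f 0 = ((rowsK friends f).countP (W gifts f) : Int) := by
    intro f hf
    rw [hansF, foldA_outer_getD gifts (rowsK friends) ded ans0 f hdednd, hans0, init0_getD,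
      if_pos hf, zero_add]
  -- values agree
  have hvals : ansF.values = scF.values := by
    rw [PySem.Dict.values_eq_map_keys ansF (by rw [hAkeys]; exact hdednd) 0,
      PySem.Dict.values_eq_map_keys scF (by rw [hscFkeys]; exact hdednd) 0,
      hAkeys, hscFkeys]
    apply List.map_congr_left
    intro f hf
    rw [hAget f hf, hpoint f hf, ← hscFgetD f]
  rw [hvals]
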